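-- pv_equiv track=rewrite | github.com/ZeerakA/CS303E | array6.py | array6
-- ===== SOURCE A (Python) =====
-- def array6(nums, index):
-- 	if len(nums) == 0:
-- 		return False
-- 	elif nums[index] == 6:
-- 		return True
-- 	elif nums[index] == nums[-1]:
-- 		return False
-- 	else:
-- 		return array6(nums, index + 1)
-- ===== SOURCE B (Python) =====
-- def array6(nums, index):
--     if len(nums) == 0:
--         return False
--     last = nums[-1]
--     i = index
--     while True:
--         v = nums[i]
--         if v == 6:
--             return True
--         if v == last:
--             return False
--         i += 1
-- ===== Notes on version B (the rewrite author's own statement) =====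
-- stated objective: simpler
-- what changed: Replaced the tail recursion by an explicit while-loop with a mutable index, computing the last element once before the loop instead of re-reading nums[-1] on every step.
import Mathlib
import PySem

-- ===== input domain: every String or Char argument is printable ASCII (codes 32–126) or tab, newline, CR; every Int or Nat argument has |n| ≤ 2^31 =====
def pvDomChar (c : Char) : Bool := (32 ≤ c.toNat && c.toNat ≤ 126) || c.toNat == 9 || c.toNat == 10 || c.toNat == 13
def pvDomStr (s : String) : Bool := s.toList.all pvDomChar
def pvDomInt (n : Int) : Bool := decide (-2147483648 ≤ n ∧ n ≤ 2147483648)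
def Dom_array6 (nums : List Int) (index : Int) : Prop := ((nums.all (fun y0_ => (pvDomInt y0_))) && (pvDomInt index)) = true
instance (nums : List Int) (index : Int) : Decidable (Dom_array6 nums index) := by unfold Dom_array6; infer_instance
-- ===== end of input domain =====

-- B replaces A's tail recursion by an explicit while-loop with a mutable index (last element read once); return value only, neither version mutates its arguments.

-- lemma needed by the ports' termination proofs
theorem pvGetSome_lt {nums : List Int} {i : Int} {v : Int}
    (h : PySem.List.pyGet? nums i = some v) : i < (nums.length : Int) := by
  by_cases hr : PySem.Raise.InRange nums.length i
  · exact hr.2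
  · rw [← PySem.List.pyGet?_eq_none_iff] at hr
    simp [hr] at h

-- ===== PORT A =====
def array6 (nums : List Int) (index : Int) : Bool :=
  if nums.length = 0 then false
  else
    match h : PySem.List.pyGet? nums index with
    | none => false  -- IndexError in Python; excluded by Pre_array6
    | some v =>
      if v = 6 then true
      else
        match PySem.List.pyGet? nums (-1) with
        | none => false  -- unreachable: nums is nonempty here
        | some last =>
          if v = last then false
          else array6 nums (index + 1)
termination_by (nums.length - index).toNat
decreasing_by
  have := pvGetSome_lt h
  omega

-- ===== PORT B =====
-- the 'while True' loop of Source B: i is the mutable index, last was read before the loop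
def array6AltLoop (nums : List Int) (last : Int) (i : Int) : Bool :=
  match h : PySem.List.pyGet? nums i with
  | none => false  -- IndexError in Python; excluded by Pre_array6
  | some v =>
    if v = 6 then true
    else if v = last then false
    else array6AltLoop nums last (i + 1)
termination_by (nums.length - i).toNat
decreasing_by
  have := pvGetSome_lt h
  omega

def array6_alt (nums : List Int) (index : Int) : Bool :=
  if nums.length = 0 then false
  else
    match PySem.List.pyGet? nums (-1) with
    | none => false  -- unreachable: nums is nonempty
    | some last => array6AltLoop nums last index

-- ===== PRECONDITION & SPEC =====
-- Pre_ excludes exactly the inputs where Python A raises IndexError: a nonempty list with index out of range.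
def Pre_array6 (nums : List Int) (index : Int) : Prop :=
  nums = [] ∨ (-(nums.length : Int) ≤ index ∧ index < (nums.length : Int))
instance (nums : List Int) (index : Int) : Decidable (Pre_array6 nums index) := by
  unfold Pre_array6; infer_instance
def pvWitness_array6 : List Int × Int := ([1, 6, 3], 0)

def Spec_array6 (nums : List Int) (index : Int) (out : Bool) : Prop := out = array6_alt nums index
instance (nums : List Int) (index : Int) (out : Bool) : Decidable (Spec_array6 nums index out) := by unfold Spec_array6; infer_instance

-- ===== CLAIM (what is proved, stated in full; the proofs are below) =====
def Claim_equal_array6 : Prop := ∀ (nums : List Int) (index : Int), Dom_array6 nums index → Pre_array6 nums index → Spec_array6 nums index (array6 nums index)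

-- ===== LEMMAS AND PROOFS =====
theorem loop_eq (nums : List Int) (last i : Int) (h0 : ¬ nums.length = 0)
    (hlast : PySem.List.pyGet? nums (-1) = some last) :
    array6 nums i = array6AltLoop nums last i := by
  fun_induction array6AltLoop nums last i
  all_goals rw [array6]; simp only [h0, if_false]; split <;> simp_all [hlast]

-- ===== VERDICT (by name: the statement is the Claim_ definition above) =====
theorem array6_spec : Claim_equal_array6 := by
  intro nums index _ _
  unfold Spec_array6 array6_alt
  by_cases h0 : nums.length = 0
  · simp [h0, array6]
  · simp only [h0, if_false]
    have hne : nums ≠ [] := by simpa [List.length_eq_zero_iff] using h0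
    obtain ⟨last, hlast⟩ : ∃ last, PySem.List.pyGet? nums (-1) = some last := by
      rw [PySem.List.pyGet?_neg_one]
      exact ⟨nums.getLast hne, List.getLast?_eq_some_getLast hne⟩
    rw [hlast]
    exact loop_eq nums last index h0 hlast
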